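-- pv_equiv track=rewrite | github.com/harsha-0907/LeetCode | microsoft/other/countNumberOfHomogeneousStrings.py | countNumberOfHomogeneousStrings
-- ===== SOURCE A (Python) =====
-- def countNumberOfHomogeneousStrings(string):
--     def combination(num):
--         return (num * (num+1)) // 2
--
--     length = len(string); cnt = 0; subStrings = set()
--     totalPossibilities = 0
--     for pos in range(length):
--         if pos != 0 and string[pos] != string[pos-1]:
--             # Calculate the possible number of substring combinations
--             totalPossibilities  += combination(cnt)
--             cnt = 1
--         else:
--             cnt += 1
--
--     else:
--         totalPossibilities += combination(cnt)
--
--     return totalPossibilities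
-- ===== SOURCE B (Python) =====
-- def countNumberOfHomogeneousStrings(string):
--     # DP: each position contributes the number of homogeneous substrings
--     # ending at it (the current run length so far); no per-run closed form,
--     # no division, no run segmentation.
--     total = 0
--     cur = 0
--     prev = None
--     for ch in string:
--         cur = cur + 1 if ch == prev else 1
--         total += cur
--         prev = ch
--     return total
-- ===== Notes on version B (the rewrite author's own statement) =====
-- stated objective: alternative
-- what changed: Replaces A's run-based accounting (reset counter per run, add the closed-form L*(L+1)//2 with integer division at each run boundary and a trailing flush) with an incremental DP that adds, at every character, the count of homogeneous substrings ending there (cur = cur+1 if same as prev else 1), using no division and no run boundaries.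
import Mathlib
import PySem

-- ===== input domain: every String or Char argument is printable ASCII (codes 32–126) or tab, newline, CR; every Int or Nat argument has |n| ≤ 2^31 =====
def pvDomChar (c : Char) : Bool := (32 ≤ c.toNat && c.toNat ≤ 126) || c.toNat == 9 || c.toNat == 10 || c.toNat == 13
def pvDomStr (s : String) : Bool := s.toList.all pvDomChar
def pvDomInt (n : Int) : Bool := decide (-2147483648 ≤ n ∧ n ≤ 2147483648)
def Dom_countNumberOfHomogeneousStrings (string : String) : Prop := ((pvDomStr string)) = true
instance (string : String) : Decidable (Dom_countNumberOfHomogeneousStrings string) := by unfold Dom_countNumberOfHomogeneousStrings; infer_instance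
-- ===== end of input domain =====

-- B replaces A's run-based accounting (reset counter + closed-form L*(L+1)//2 per run with a
-- trailing flush) with a per-character DP that adds the current run length at every position.


-- ===== PORT A =====
-- A's inner helper `combination`
def pvCombination (num : Int) : Int := PySem.Int.floordiv (num * (num + 1)) 2

-- A's loop body over `pos`; state = (cnt, totalPossibilities).
-- `string[pos]` / `string[pos-1]` are ported with pyGetD: every index the loop reads is in range,
-- so the default is never used and the port is exact.
def pvStepA (cs : List Char) (st : Int × Int) (pos : Int) : Int × Int :=
  if pos ≠ 0 ∧ PySem.List.pyGetD cs pos ' ' ≠ PySem.List.pyGetD cs (pos - 1) ' ' then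
    (1, st.2 + pvCombination st.1)
  else
    (st.1 + 1, st.2)

def countNumberOfHomogeneousStrings (string : String) : Int :=
  let cs := string.toList
  let length : Int := PySem.Str.len string
  let st := (PySem.List.pyRange 0 length 1).foldl (pvStepA cs) (0, 0)
  -- the for-else clause: totalPossibilities += combination(cnt)
  st.2 + pvCombination st.1

-- ===== PORT B =====
-- B's loop body; state = (total, cur, prev).
def pvStepB (st : Int × Int × Option Char) (ch : Char) : Int × Int × Option Char :=
  let cur := if some ch = st.2.2 then st.2.1 + 1 else 1
  (st.1 + cur, cur, some ch)

def countNumberOfHomogeneousStrings_alt (string : String) : Int :=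
  (string.toList.foldl pvStepB (0, 0, none)).1

-- ===== PRECONDITION & SPEC =====
def Spec_countNumberOfHomogeneousStrings (string : String) (out : Int) : Prop := out = countNumberOfHomogeneousStrings_alt string
instance (string : String) (out : Int) : Decidable (Spec_countNumberOfHomogeneousStrings string out) := by unfold Spec_countNumberOfHomogeneousStrings; infer_instance

-- ===== CLAIM (what is proved, stated in full; the proofs are below) =====
def Claim_equal_countNumberOfHomogeneousStrings : Prop := ∀ (string : String), Dom_countNumberOfHomogeneousStrings string → Spec_countNumberOfHomogeneousStrings string (countNumberOfHomogeneousStrings string)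

-- ===== LEMMAS AND PROOFS =====

-- Canonical middle form: the homogeneous-substring count per maximal run.
def pvRunSum : List Char → Int
  | [] => 0
  | c :: rest =>
    let L : Int := 1 + ((rest.takeWhile (· == c)).length : Int)
    pvCombination L + pvRunSum (rest.dropWhile (· == c))
termination_by cs => cs.length
decreasing_by
  simpa using Nat.lt_succ_of_le (List.length_dropWhile_le _ _)

-- A's loop, re-expressed structurally: remaining characters, previous character, current run count.
def pvG : List Char → Char → Int → Int
  | [], _, cnt => pvCombination cnt
  | c :: rest, prev, cnt =>
    if c ≠ prev then pvCombination cnt + pvG rest c 1 else pvG rest c (cnt + 1)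

-- pvG splits off the rest of the current run, then behaves like pvRunSum.
theorem pvG_eq (cs : List Char) : ∀ (prev : Char) (cnt : Int),
    pvG cs prev cnt =
      pvCombination (cnt + ((cs.takeWhile (· == prev)).length : Int)) +
        pvRunSum (cs.dropWhile (· == prev)) := by
  induction cs with
  | nil => intro prev cnt; simp [pvG, pvRunSum]
  | cons c rest ih =>
    intro prev cnt
    by_cases h : c = prev
    · subst h
      have h1 : pvG (c :: rest) c cnt = pvG rest c (cnt + 1) := by simp [pvG]
      rw [h1, ih]
      simp only [List.takeWhile_cons, List.dropWhile_cons, beq_self_eq_true, if_true]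
      have h2 : cnt + 1 + ((rest.takeWhile (· == c)).length : Int)
          = cnt + (((c :: rest.takeWhile (· == c)).length : Int)) := by
        push_cast [List.length_cons]; ring
      rw [h2]
    · have hbeq : (c == prev) = false := by simp [h]
      have h1 : pvG (c :: rest) prev cnt = pvCombination cnt + pvG rest c 1 := by
        simp [pvG, h]
      have h2 : (c :: rest).takeWhile (· == prev) = [] := by
        simp [hbeq]
      have h3 : (c :: rest).dropWhile (· == prev) = c :: rest := by
        simp [hbeq]
      rw [h1, ih c 1, h2, h3]
      simp only [pvRunSum, pvCombination, List.length_nil, Nat.cast_zero, add_zero]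

theorem pvG_head (c : Char) (rest : List Char) : pvG rest c 1 = pvRunSum (c :: rest) := by
  rw [pvG_eq]
  simp only [pvRunSum, pvCombination]

-- Bridge: A's index fold from position i (1 ≤ i) equals pvG on the remaining characters.
theorem bridge (cs : List Char) : ∀ (k i : Nat), cs.length - i = k → 1 ≤ i → i ≤ cs.length →
    ∀ (prev : Char) (cnt tot : Int), cs[i - 1]? = some prev →
    (let st := (PySem.List.pyRange (i : Int) (cs.length : Int) 1).foldl (pvStepA cs) (cnt, tot)
     st.2 + pvCombination st.1) = tot + pvG (cs.drop i) prev cnt := by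
  intro k
  induction k with
  | zero =>
    intro i hk h1 h2 prev cnt tot hprev
    have hi : i = cs.length := by omega
    subst hi
    rw [PySem.List.pyRange_one_eq_nil (by omega)]
    simp [pvG]
  | succ k ih =>
    intro i hk h1 h2 prev cnt tot hprev
    have hlt : i < cs.length := by omega
    rw [PySem.List.pyRange_one_cons (by exact_mod_cast hlt)]
    have hget : PySem.List.pyGetD cs (i : Int) ' ' = cs[i] := by
      rw [PySem.List.pyGetD_natCast]
      simp [hlt]
    have hgetp : PySem.List.pyGetD cs ((i : Int) - 1) ' ' = prev := by
      have hc : ((i : Int) - 1) = ((i - 1 : Nat) : Int) := by omega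
      rw [hc, PySem.List.pyGetD_natCast]
      simp [hprev]
    have hdrop : cs.drop i = cs[i] :: cs.drop (i + 1) := List.drop_eq_getElem_cons hlt
    have hprev' : cs[(i + 1) - 1]? = some cs[i] := by simp
    have hnz : ((i : Int) ≠ 0) := by omega
    by_cases hne : cs[i] = prev
    · have hstep : pvStepA cs (cnt, tot) (i : Int) = (cnt + 1, tot) := by
        simp [pvStepA, hget, hgetp, hne]
      simp only [List.foldl_cons, hstep]
      have hIH := ih (i + 1) (by omega) (by omega) (by omega) cs[i] (cnt + 1) tot hprev'
      simp only at hIH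
      push_cast at hIH ⊢
      rw [hIH, hdrop]
      have hg : pvG (cs[i] :: cs.drop (i + 1)) prev cnt = pvG (cs.drop (i + 1)) cs[i] (cnt + 1) := by
        simp [pvG, hne]
      rw [hg]
    · have hstep : pvStepA cs (cnt, tot) (i : Int) = (1, tot + pvCombination cnt) := by
        unfold pvStepA
        rw [hget, hgetp, if_pos ⟨hnz, hne⟩]
      simp only [List.foldl_cons, hstep]
      have hIH := ih (i + 1) (by omega) (by omega) (by omega) cs[i] 1 (tot + pvCombination cnt) hprev'
      simp only at hIH
      push_cast at hIH ⊢
      rw [hIH, hdrop]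
      have hg : pvG (cs[i] :: cs.drop (i + 1)) prev cnt
          = pvCombination cnt + pvG (cs.drop (i + 1)) cs[i] 1 := by
        simp [pvG, hne]
      rw [hg]
      ring

-- The whole of A's computation, at the level of the character list.
theorem mainA_list (cs : List Char) :
    (let st := (PySem.List.pyRange 0 (cs.length : Int) 1).foldl (pvStepA cs) (0, 0)
     st.2 + pvCombination st.1) = pvRunSum cs := by
  cases cs with
  | nil => simp [PySem.List.pyRange, pvRunSum, pvCombination, PySem.Int.floordiv]
  | cons c rest =>
    have hlen : (0 : Int) < ((c :: rest).length : Int) := by exact_mod_cast Nat.succ_pos rest.length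
    rw [PySem.List.pyRange_one_cons hlen]
    simp only [List.foldl_cons]
    have hstep0 : pvStepA (c :: rest) (0, 0) 0 = (1, 0) := by simp [pvStepA]
    rw [hstep0]
    have hb := bridge (c :: rest) rest.length 1 (by simp) le_rfl (by simp) c 1 0 (by simp)
    simp only at hb
    push_cast at hb ⊢
    norm_num at hb ⊢
    rw [hb, pvG_head]

-- Triangular-number step: (n+1)(n+2)//2 = n(n+1)//2 + (n+1) (exact since n(n+1) is even).
theorem tri_succ (n : Int) : pvCombination (n + 1) = pvCombination n + (n + 1) := by
  unfold pvCombination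
  rw [PySem.Int.floordiv_eq_ediv_of_pos (by norm_num),
      PySem.Int.floordiv_eq_ediv_of_pos (by norm_num)]
  have h : (n + 1) * (n + 1 + 1) = n * (n + 1) + (n + 1) * 2 := by ring
  rw [h, Int.add_mul_ediv_right _ _ (by norm_num : (2:Int) ≠ 0)]

-- B's fold from a mid-run state: it adds the partial triangular sums of pvG.
theorem foldB_eq (cs : List Char) : ∀ (tot cur : Int) (p : Char),
    (cs.foldl pvStepB (tot, cur, some p)).1 = tot + pvG cs p cur - pvCombination cur := by
  induction cs with
  | nil => intro tot cur p; simp [pvG]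
  | cons c rest ih =>
    intro tot cur p
    by_cases h : c = p
    · subst h
      have hstep : pvStepB (tot, cur, some c) c = (tot + (cur + 1), cur + 1, some c) := by
        simp [pvStepB]
      simp only [List.foldl_cons, hstep, ih]
      have hg : pvG (c :: rest) c cur = pvG rest c (cur + 1) := by simp [pvG]
      rw [hg, tri_succ]
      ring
    · have hstep : pvStepB (tot, cur, some p) c = (tot + 1, 1, some c) := by
        simp [pvStepB, h]
      simp only [List.foldl_cons, hstep, ih]
      have hg : pvG (c :: rest) p cur = pvCombination cur + pvG rest c 1 := by
        simp [pvG, h]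
      have h1 : pvCombination 1 = 1 := by decide
      rw [hg, h1]
      ring

-- The whole of B's computation, at the level of the character list.
theorem mainB_list (cs : List Char) :
    (cs.foldl pvStepB (0, 0, none)).1 = pvRunSum cs := by
  cases cs with
  | nil => simp [pvRunSum]
  | cons c rest =>
    have hstep : pvStepB (0, 0, none) c = (1, 1, some c) := by simp [pvStepB]
    simp only [List.foldl_cons, hstep, foldB_eq]
    have h1 : pvCombination 1 = 1 := by decide
    rw [h1, pvG_head]
    ring

-- ===== VERDICT (by name: the statement is the Claim_ definition above) =====
theorem countNumberOfHomogeneousStrings_spec : Claim_equal_countNumberOfHomogeneousStrings := by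
  intro s _
  unfold Spec_countNumberOfHomogeneousStrings countNumberOfHomogeneousStrings countNumberOfHomogeneousStrings_alt
  simp only [PySem.Str.len_eq]
  rw [mainB_list s.toList]
  exact mainA_list s.toList
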